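-- pv_equiv track=rewrite | github.com/Kdixter/Kabir_Vohra_Urvashi_Balasubraniam_A1 | life_expectancy_task/src/train_poly.py | build_poly_feature_map
-- ===== SOURCE A (Python) =====
-- from itertools import combinations_with_replacement
-- from typing import Dict, Tuple, List
--
-- def build_poly_feature_map(base_features: List[str], degree: int) -> List[Tuple[Tuple[int, ...], Tuple[str, ...]]]:
-- 	"""Return mapping of polynomial terms using index tuples and names.
-- 	Each term is represented by a tuple of base feature indices (with replacement, sorted).
-- 	For degree=1, includes each base feature once; for degree=2, includes all pairs (i<=j), etc.
-- 	"""
-- 	index_map = list(range(len(base_features)))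
-- 	terms: List[Tuple[Tuple[int, ...], Tuple[str, ...]]] = []
-- 	for d in range(1, degree + 1):
-- 		for combo in combinations_with_replacement(index_map, d):
-- 			name_tuple = tuple(base_features[i] for i in combo)
-- 			terms.append((combo, name_tuple))
-- 	return terms
-- ===== SOURCE B (Python) =====
-- def build_poly_feature_map(base_features, degree):
-- 	"""Level-by-level growth: degree-(d+1) terms are degree-d terms extended
-- 	by every index >= their last element, instead of re-enumerating each degree."""
-- 	terms = []
-- 	if degree < 1:
-- 		return terms
-- 	n = len(base_features)
-- 	level = [((i,), (base_features[i],)) for i in range(n)]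
-- 	terms.extend(level)
-- 	for _ in range(2, degree + 1):
-- 		nxt = []
-- 		for idx, names in level:
-- 			for j in range(idx[-1], n):
-- 				nxt.append((idx + (j,), names + (base_features[j],)))
-- 		level = nxt
-- 		terms.extend(level)
-- 	return terms
-- ===== Notes on version B (the rewrite author's own statement) =====
-- stated objective: alternative
-- what changed: Replaces the per-degree calls to combinations_with_replacement with a level-by-level DP: each degree's index tuples are built by extending the previous degree's tuples at the tail with every index >= their last element, and names are accumulated incrementally.
import Mathlib
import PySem

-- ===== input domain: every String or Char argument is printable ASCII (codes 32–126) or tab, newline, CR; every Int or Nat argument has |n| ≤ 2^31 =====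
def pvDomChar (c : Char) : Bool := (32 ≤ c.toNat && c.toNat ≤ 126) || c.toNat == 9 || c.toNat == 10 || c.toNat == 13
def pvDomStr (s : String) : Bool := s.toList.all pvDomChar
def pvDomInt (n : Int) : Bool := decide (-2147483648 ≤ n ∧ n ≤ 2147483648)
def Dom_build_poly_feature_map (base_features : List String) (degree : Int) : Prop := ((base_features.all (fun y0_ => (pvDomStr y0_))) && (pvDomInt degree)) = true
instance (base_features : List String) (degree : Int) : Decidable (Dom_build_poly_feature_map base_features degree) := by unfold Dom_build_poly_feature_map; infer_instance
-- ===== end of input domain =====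

-- B grows the term list level by level (each degree's tuples extend the previous degree's at the
-- tail) instead of enumerating combinations_with_replacement per degree from scratch; objective:
-- alternative decomposition, identical results.

-- ===== PORT A =====
-- itertools.combinations_with_replacement(xs, d), in the exact order itertools yields it
def pvCwr (xs : List Int) (d : Nat) : List (List Int) :=
  match d, xs with
  | 0, _ => [[]]
  | _ + 1, [] => []
  | d + 1, x :: rest => ((pvCwr (x :: rest) d).map (fun t => x :: t)) ++ pvCwr rest (d + 1)
termination_by (d, xs.length)

def build_poly_feature_map (base_features : List String) (degree : Int) : List (List Int × List String) :=
  let index_map := PySem.List.pyRange 0 (base_features.length : Int) 1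
  (PySem.List.pyRange 1 (degree + 1) 1).foldl
    (fun terms d =>
      (pvCwr index_map d.toNat).foldl
        (fun terms combo =>
          terms ++ [(combo, combo.map (fun i => PySem.List.pyGetD base_features i ""))])
        terms)
    []

-- ===== PORT B =====
def build_poly_feature_map_alt (base_features : List String) (degree : Int) : List (List Int × List String) :=
  if degree < 1 then [] else
  let n : Int := (base_features.length : Int)
  let level := (PySem.List.pyRange 0 n 1).map
    (fun i => ([i], [PySem.List.pyGetD base_features i ""]))
  let st := (PySem.List.pyRange 2 (degree + 1) 1).foldl
    (fun (st : List (List Int × List String) × List (List Int × List String)) _ =>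
      let nxt := st.2.foldl
        (fun nxt p =>
          nxt ++ (PySem.List.pyRange (PySem.List.pyGetD p.1 (-1) 0) n 1).map
            (fun j => (p.1 ++ [j], p.2 ++ [PySem.List.pyGetD base_features j ""])))
        []
      (st.1 ++ nxt, nxt))
    (level, level)
  st.1

-- ===== PRECONDITION & SPEC =====
def Spec_build_poly_feature_map (base_features : List String) (degree : Int) (out : List (List Int × List String)) : Prop := out = build_poly_feature_map_alt base_features degree
instance (base_features : List String) (degree : Int) (out : List (List Int × List String)) : Decidable (Spec_build_poly_feature_map base_features degree out) := by unfold Spec_build_poly_feature_map; infer_instance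

-- ===== CLAIM (what is proved, stated in full; the proofs are below) =====
def Claim_equal_build_poly_feature_map : Prop := ∀ (base_features : List String) (degree : Int), Dom_build_poly_feature_map base_features degree → Spec_build_poly_feature_map base_features degree (build_poly_feature_map base_features degree)

-- ===== LEMMAS AND PROOFS =====

-- attach the name tuple to a combo, the way A computes it
def pvWn (bf : List String) (t : List Int) : List Int × List String :=
  (t, t.map (fun i => PySem.List.pyGetD bf i ""))

-- tail-extensions of a combo t by every element of xs not below t's last element
def pvExt (xs : List Int) (t : List Int) : List (List Int) :=
  (match t.getLast? with
   | none => xs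
   | some m => xs.dropWhile (fun y => decide (y < m))).map (fun j => t ++ [j])

-- the degree-d slice of the output, and the whole output up to degree k
def pvPairs (bf : List String) (d : Nat) : List (List Int × List String) :=
  (pvCwr (PySem.List.pyRange 0 (bf.length : Int) 1) d).map (pvWn bf)

def pvAll (bf : List String) (k : Nat) : List (List Int × List String) :=
  (List.range k).flatMap (fun i => pvPairs bf (i + 1))

lemma pvCwr_zero (xs : List Int) : pvCwr xs 0 = [[]] := by rw [pvCwr.eq_def]

lemma pvCwr_succ_nil (d : Nat) : pvCwr [] (d + 1) = [] := by rw [pvCwr.eq_def]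

lemma pvCwr_succ_cons (x : Int) (rest : List Int) (d : Nat) :
    pvCwr (x :: rest) (d + 1) = ((pvCwr (x :: rest) d).map (fun t => x :: t)) ++ pvCwr rest (d + 1) := by
  rw [pvCwr]

lemma pvCwr_length (xs : List Int) (d : Nat) : ∀ t ∈ pvCwr xs d, t.length = d := by
  fun_induction pvCwr xs d with
  | case1 => simp
  | case2 => simp
  | case3 d x rest ih1 ih2 =>
    intro t ht
    simp at ht
    rcases ht with ⟨u, hu, rfl⟩ | ht
    · simp [ih1 u hu]
    · exact ih2 t ht

lemma pvCwr_subset (xs : List Int) (d : Nat) : ∀ t ∈ pvCwr xs d, ∀ y ∈ t, y ∈ xs := by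
  fun_induction pvCwr xs d with
  | case1 => simp
  | case2 => simp
  | case3 d x rest ih1 ih2 =>
    intro t ht
    simp at ht
    rcases ht with ⟨u, hu, rfl⟩ | ht
    · intro y hy
      rcases List.mem_cons.1 hy with rfl | hy
      · exact List.mem_cons_self
      · exact ih1 u hu y hy
    · intro y hy
      exact List.mem_cons_of_mem x (ih2 t ht y hy)

lemma pvCwr_one (xs : List Int) : pvCwr xs 1 = xs.map (fun x => [x]) := by
  induction xs with
  | nil => rw [pvCwr_succ_nil]; rfl
  | cons x r ih => rw [pvCwr_succ_cons, pvCwr_zero]; simp [ih]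

lemma pvExt_cons (x : Int) (r t : List Int) :
    pvExt (x :: r) (x :: t) = (pvExt (x :: r) t).map (fun u => x :: u) := by
  cases t with
  | nil =>
    simp [pvExt]
  | cons y t' =>
    simp only [pvExt, List.getLast?_cons_cons, List.map_map]
    cases h : (y :: t').getLast? with
    | none => simp at h
    | some m => simp [Function.comp]

lemma pvCwr_snoc (xs : List Int) (d : Nat) (h : xs.Pairwise (· < ·)) :
    pvCwr xs (d + 1) = (pvCwr xs d).flatMap (pvExt xs) := by
  induction d generalizing xs with
  | zero =>
    rw [pvCwr_zero]
    simp only [List.flatMap_cons, List.flatMap_nil, List.append_nil]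
    induction xs with
    | nil => rw [pvCwr_succ_nil]; simp [pvExt]
    | cons x r ih =>
      rw [pvCwr_succ_cons, pvCwr_zero, ih (List.Pairwise.sublist (List.sublist_cons_self x r) h)]
      simp [pvExt]
  | succ d ihd =>
    induction xs with
    | nil => rw [pvCwr_succ_nil, pvCwr_succ_nil]; simp
    | cons x r ihxs =>
      have hr : r.Pairwise (· < ·) := List.Pairwise.sublist (List.sublist_cons_self x r) h
      have hx : ∀ y ∈ r, x < y := fun y hy => (List.pairwise_cons.1 h).1 y hy
      rw [pvCwr_succ_cons x r (d + 1)]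
      conv_rhs => rw [pvCwr_succ_cons x r d]
      rw [ihd (x :: r) h, ihxs hr]
      rw [List.flatMap_append, List.map_flatMap, List.flatMap_map]
      congr 1
      · exact List.flatMap_congr (fun t _ => (pvExt_cons x r t).symm)
      · refine List.flatMap_congr (fun t ht => ?_)
        have hlen : t.length = d + 1 := pvCwr_length r (d + 1) t ht
        have hne : t ≠ [] := by intro hn; rw [hn] at hlen; simp at hlen
        have hm : t.getLast? = some (t.getLast hne) := List.getLast?_eq_some_getLast hne
        have hmem : t.getLast hne ∈ r := pvCwr_subset r (d + 1) t ht _ (List.getLast_mem hne)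
        simp only [pvExt, hm]
        rw [List.dropWhile_cons]
        simp [hx _ hmem]

lemma pvDW_aux (m n : Int) (k : Nat) : ∀ a : Int, (n - a).toNat ≤ k → a ≤ m →
    (PySem.List.pyRange a n 1).dropWhile (fun y => decide (y < m)) = PySem.List.pyRange m n 1 := by
  induction k with
  | zero =>
    intro a hk ham
    rw [PySem.List.pyRange_one_eq_nil (by omega), PySem.List.pyRange_one_eq_nil (by omega)]
    rfl
  | succ k ih =>
    intro a hk ham
    by_cases han : a < n
    · rw [PySem.List.pyRange_one_cons han, List.dropWhile_cons]
      by_cases ham' : a < m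
      · simp only [ham', decide_true, if_true]
        exact ih (a + 1) (by omega) (by omega)
      · have : a = m := by omega
        subst this
        simp only [decide_eq_true_eq, if_neg ham']
        rw [PySem.List.pyRange_one_cons han]
    · rw [PySem.List.pyRange_one_eq_nil (by omega), PySem.List.pyRange_one_eq_nil (by omega)]
      rfl

lemma pvDropWhile_pyRange (m n : Int) (hm : 0 ≤ m) :
    (PySem.List.pyRange 0 n 1).dropWhile (fun y => decide (y < m)) = PySem.List.pyRange m n 1 :=
  pvDW_aux m n (n - 0).toNat 0 (le_refl _) hm

lemma pvPairs_one (bf : List String) :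
    pvPairs bf 1 = (PySem.List.pyRange 0 (bf.length : Int) 1).map
      (fun i => ([i], [PySem.List.pyGetD bf i ""])) := by
  unfold pvPairs
  rw [pvCwr_one, List.map_map]
  rfl

lemma pvAll_succ (bf : List String) (k : Nat) :
    pvAll bf (k + 1) = pvAll bf k ++ pvPairs bf (k + 1) := by
  unfold pvAll
  rw [List.range_succ, List.flatMap_append]
  simp

-- one B step on the degree-d level produces the degree-(d+1) level
lemma pvStep_pairs (bf : List String) (d : Nat) (hd : 1 ≤ d) :
    (pvPairs bf d).foldl
      (fun nxt p =>
        nxt ++ (PySem.List.pyRange (PySem.List.pyGetD p.1 (-1) 0) (bf.length : Int) 1).map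
          (fun j => (p.1 ++ [j], p.2 ++ [PySem.List.pyGetD bf j ""])))
      []
    = pvPairs bf (d + 1) := by
  rw [PySem.List.foldl_append_eq_flatMap, List.nil_append]
  unfold pvPairs
  obtain ⟨e, rfl⟩ : ∃ e, d = e + 1 := ⟨d - 1, by omega⟩
  rw [pvCwr_snoc _ (e + 1) (PySem.List.pairwise_lt_pyRange_one 0 (bf.length : Int))]
  rw [List.flatMap_map, List.map_flatMap]
  refine List.flatMap_congr (fun t ht => ?_)
  have hlen : t.length = e + 1 := pvCwr_length _ _ t ht
  have hne : t ≠ [] := by intro hn; rw [hn] at hlen; simp at hlen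
  have hm : t.getLast? = some (t.getLast hne) := List.getLast?_eq_some_getLast hne
  have hmem : t.getLast hne ∈ PySem.List.pyRange 0 (bf.length : Int) 1 :=
    pvCwr_subset _ _ t ht _ (List.getLast_mem hne)
  have h0 : 0 ≤ t.getLast hne := ((PySem.List.mem_pyRange_one).1 hmem).1
  simp only [pvWn, pvExt, hm]
  rw [show PySem.List.pyGetD t (-1) 0 = t.getLast hne from PySem.List.pyGetD_neg_one t 0 hne]
  rw [pvDropWhile_pyRange _ _ h0, List.map_map]
  refine List.map_congr_left (fun j _ => ?_)
  simp [pvWn]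

lemma pvA_eq (bf : List String) (k : Nat) :
    build_poly_feature_map bf (k : Int) = pvAll bf k := by
  unfold build_poly_feature_map
  simp only [PySem.List.foldl_append_singleton_eq_map, PySem.List.foldl_append_eq_flatMap,
    List.nil_append]
  have hk1 : ((k : Int) + 1 - 1).toNat = k := by omega
  rw [show PySem.List.pyRange 1 ((k : Int) + 1) 1
      = (List.range k).map (fun j : Nat => ((j : Int) + 1)) by
    rw [PySem.List.pyRange_one, hk1]; exact List.map_congr_left (fun j _ => by omega)]
  rw [List.flatMap_map]
  unfold pvAll
  refine List.flatMap_congr (fun i hi => ?_)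
  have h2 : ((i : Int) + 1).toNat = i + 1 := by omega
  rw [h2]
  rfl

lemma pvB_fold (bf : List String) (j : Nat) (hj : 1 ≤ j) :
    (PySem.List.pyRange 2 ((j : Int) + 1) 1).foldl
      (fun (st : List (List Int × List String) × List (List Int × List String)) _ =>
        let nxt := st.2.foldl
          (fun nxt p =>
            nxt ++ (PySem.List.pyRange (PySem.List.pyGetD p.1 (-1) 0) (bf.length : Int) 1).map
              (fun j => (p.1 ++ [j], p.2 ++ [PySem.List.pyGetD bf j ""])))
          []
        (st.1 ++ nxt, nxt))
      (pvPairs bf 1, pvPairs bf 1)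
    = (pvAll bf j, pvPairs bf j) := by
  induction j with
  | zero => omega
  | succ j ih =>
    by_cases hj1 : j = 0
    · subst hj1
      rw [show ((1 : Nat) : Int) + 1 = 2 by norm_num, PySem.List.pyRange_one_eq_nil (by norm_num)]
      simp [pvAll, List.range_succ]
    · have h1 : 1 ≤ j := by omega
      have : ((j + 1 : Nat) : Int) + 1 = ((j : Int) + 1) + 1 := by push_cast; ring
      rw [this, PySem.List.pyRange_one_succ_right (by omega), List.foldl_append, ih h1]
      simp only [List.foldl_cons, List.foldl_nil]
      rw [pvStep_pairs bf j h1, pvAll_succ]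

lemma pvB_eq (bf : List String) (k : Nat) (hk : 1 ≤ k) :
    build_poly_feature_map_alt bf (k : Int) = pvAll bf k := by
  unfold build_poly_feature_map_alt
  rw [if_neg (by omega)]
  simp only []
  rw [← pvPairs_one bf, pvB_fold bf k hk]

-- ===== VERDICT (by name: the statement is the Claim_ definition above) =====
theorem build_poly_feature_map_spec : Claim_equal_build_poly_feature_map := by
  intro bf degree _
  unfold Spec_build_poly_feature_map
  by_cases h : degree ≤ 0
  · have hA : build_poly_feature_map bf degree = [] := by
      unfold build_poly_feature_map
      rw [show PySem.List.pyRange 1 (degree + 1) 1 = [] from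
        PySem.List.pyRange_one_eq_nil (by omega)]
      rfl
    have hB : build_poly_feature_map_alt bf degree = [] := by
      unfold build_poly_feature_map_alt
      rw [if_pos (by omega)]
    rw [hA, hB]
  · have hk : degree = ((degree.toNat : Nat) : Int) := by omega
    rw [hk, pvA_eq, pvB_eq bf degree.toNat (by omega)]
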